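-- pv_equiv track=rewrite | github.com/BioPAL/BioPAL | src/arepytools/io/parsing/pyxb_aresys_conversion.py | _reduce_to_lines_per_burst_dict
-- ===== SOURCE A (Python) =====
-- def _reduce_to_lines_per_burst_dict(lines_per_burst):
--     out = dict()
--     last_num_lines = 0
--     for i_burst, lines_per_burst in enumerate(lines_per_burst):
--         if lines_per_burst != last_num_lines:
--             last_num_lines = lines_per_burst
--             out[i_burst] = last_num_lines
--     return out
-- ===== SOURCE B (Python) =====
-- def _reduce_to_lines_per_burst_dict(lines_per_burst):
--     # Run-length decomposition: scan each maximal run of equal values once,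
--     # record its start index (skipping a leading run of 0, the baseline).
--     out = {}
--     n = len(lines_per_burst)
--     i = 0
--     while i < n:
--         v = lines_per_burst[i]
--         j = i + 1
--         while j < n and lines_per_burst[j] == v:
--             j += 1
--         if i != 0 or v != 0:
--             out[i] = v
--         i = j
--     return out
-- ===== Notes on version B (the rewrite author's own statement) =====
-- stated objective: alternative
-- what changed: B compresses the input into maximal runs of equal values (groupby-style two-level scan) and emits each run's start index, skipping only a leading run of zeros, instead of A's per-element comparison against a running last value.
import Mathlib
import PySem

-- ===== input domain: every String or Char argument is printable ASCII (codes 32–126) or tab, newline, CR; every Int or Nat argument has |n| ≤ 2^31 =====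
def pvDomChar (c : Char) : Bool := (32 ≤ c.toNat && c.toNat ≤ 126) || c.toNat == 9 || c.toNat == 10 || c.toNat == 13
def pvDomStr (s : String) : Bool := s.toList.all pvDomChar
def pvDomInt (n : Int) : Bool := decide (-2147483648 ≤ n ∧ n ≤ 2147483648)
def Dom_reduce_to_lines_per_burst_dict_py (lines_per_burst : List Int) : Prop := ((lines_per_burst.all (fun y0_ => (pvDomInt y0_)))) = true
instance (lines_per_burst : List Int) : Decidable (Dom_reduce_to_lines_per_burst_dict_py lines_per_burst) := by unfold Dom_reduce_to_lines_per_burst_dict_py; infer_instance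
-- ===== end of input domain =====

-- B replaces A's per-element change detection by a run-length decomposition (scan each
-- maximal run once, emit its start index, skip a leading zero run); alternative, same cost.

-- ===== PORT A =====
-- for-loop over enumerate(lines_per_burst) building a dict keyed by burst index
def reduce_to_lines_per_burst_dict_py (lines_per_burst : List Int) : List (Int × Int) :=
  (((PySem.List.enumerate lines_per_burst 0).foldl
      (fun (st : PySem.Dict Int Int × Int) p =>
        if p.2 ≠ st.2 then (st.1.insert p.1 p.2, p.2) else st)
      (PySem.Dict.empty, 0)).1).items

-- ===== PORT B =====
-- outer while-loop of Source B: `rest.takeWhile (· == v)` is the inner while that scans the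
-- current run; emit (start index, value) unless it is a leading run of zeros
def reduce_to_lines_per_burst_dict_py_alt_go (i : Int) (l : List Int) : List (Int × Int) :=
  match l with
  | [] => []
  | v :: rest =>
      (if i ≠ 0 ∨ v ≠ 0 then [(i, v)] else []) ++
        reduce_to_lines_per_burst_dict_py_alt_go
          (i + ((rest.takeWhile (· == v)).length + 1)) (rest.dropWhile (· == v))
termination_by l.length
decreasing_by
  simp only [List.length_cons]
  exact Nat.lt_succ_of_le (List.length_dropWhile_le _ _)

def reduce_to_lines_per_burst_dict_py_alt (lines_per_burst : List Int) : List (Int × Int) :=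
  reduce_to_lines_per_burst_dict_py_alt_go 0 lines_per_burst

-- ===== PRECONDITION & SPEC =====
def Spec_reduce_to_lines_per_burst_dict_py (lines_per_burst : List Int) (out : List (Int × Int)) : Prop := out = reduce_to_lines_per_burst_dict_py_alt lines_per_burst
instance (lines_per_burst : List Int) (out : List (Int × Int)) : Decidable (Spec_reduce_to_lines_per_burst_dict_py lines_per_burst out) := by unfold Spec_reduce_to_lines_per_burst_dict_py; infer_instance

-- ===== CLAIM (what is proved, stated in full; the proofs are below) =====
def Claim_equal_reduce_to_lines_per_burst_dict_py : Prop := ∀ (lines_per_burst : List Int), Dom_reduce_to_lines_per_burst_dict_py lines_per_burst → Spec_reduce_to_lines_per_burst_dict_py lines_per_burst (reduce_to_lines_per_burst_dict_py lines_per_burst)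

-- ===== LEMMAS AND PROOFS =====

-- proof-side reference: the change list emitted from index i with running last value `last`
def pvChg (i last : Int) (l : List Int) : List (Int × Int) :=
  match l with
  | [] => []
  | x :: xs => if x ≠ last then (i, x) :: pvChg (i + 1) x xs else pvChg (i + 1) last xs

-- A's fold over the enumeration appends exactly pvChg (keys already present are < s)
theorem pvA_fold (l : List Int) : ∀ (s last : Int) (d : PySem.Dict Int Int),
    (∀ k ∈ d.keys, k < s) →
    (((PySem.List.enumerate l s).foldl
      (fun (st : PySem.Dict Int Int × Int) p =>
        if p.2 ≠ st.2 then (st.1.insert p.1 p.2, p.2) else st)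
      (d, last)).1).items = d.items ++ pvChg s last l := by
  induction l with
  | nil => intro s last d _; simp [PySem.List.enumerate_nil, pvChg]
  | cons x xs ih =>
      intro s last d hk
      rw [PySem.List.enumerate_cons, List.foldl_cons]
      simp only [pvChg]
      by_cases hx : x ≠ last
      · rw [if_pos hx, if_pos hx]
        have hnc : d.contains s = false := by
          rw [PySem.Dict.contains_eq_decide_mem_keys]
          simp only [decide_eq_false_iff_not]
          intro hmem; exact absurd rfl (ne_of_lt (hk s hmem))
        rw [ih (s + 1) x (d.insert s x) (by
          intro k hkmem
          rcases (PySem.Dict.mem_keys_insert _ _ _ _).1 hkmem with h | h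
          · omega
          · have := hk k h; omega)]
        rw [PySem.Dict.items_insert_of_not_contains _ _ hnc]
        simp
      · rw [if_neg hx, if_neg hx]
        have hxx : x = last := not_not.1 hx
        subst hxx
        rw [ih (s + 1) x d (by intro k hkmem; have := hk k hkmem; omega)]

-- pvChg skips a prefix all equal to the running value
theorem pvChg_const_prefix (t : List Int) (x : Int) (h : ∀ y ∈ t, y = x) :
    ∀ (j : Int) (d : List Int), pvChg j x (t ++ d) = pvChg (j + t.length) x d := by
  induction t with
  | nil => intro j d; simp
  | cons y ys ih =>
      intro j d
      have hy : y = x := h y (by simp)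
      subst hy
      simp only [List.cons_append, pvChg, ne_eq, not_true_eq_false, if_neg, not_false_eq_true]
      rw [ih (fun z hz => h z (by simp [hz])) (j + 1) d]
      have : j + 1 + (ys.length : Int) = j + ((y :: ys).length : Int) := by
        simp only [List.length_cons]; push_cast; ring
      rw [this]

-- B's run loop computes pvChg under the loop invariant
theorem pvB_go_aux (n : Nat) : ∀ (l : List Int), l.length ≤ n → ∀ (i last : Int), 0 ≤ i → (i = 0 → last = 0) →
    (∀ h, l.head? = some h → i ≠ 0 → h ≠ last) →
    reduce_to_lines_per_burst_dict_py_alt_go i l = pvChg i last l := by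
  induction n with
  | zero =>
      intro l hl i last _ _ _
      have : l = [] := List.eq_nil_of_length_eq_zero (by omega)
      subst this
      simp [reduce_to_lines_per_burst_dict_py_alt_go, pvChg]
  | succ n ihn =>
      intro l hl i last hi h0 hh
      match l with
      | [] => simp [reduce_to_lines_per_burst_dict_py_alt_go, pvChg]
      | v :: rest =>
      rw [reduce_to_lines_per_burst_dict_py_alt_go]
      have hsplit : rest.takeWhile (· == v) ++ rest.dropWhile (· == v) = rest :=
        List.takeWhile_append_dropWhile
      have hemit : (i ≠ 0 ∨ v ≠ 0) ↔ v ≠ last := by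
        by_cases hiz : i = 0
        · have := h0 hiz; subst this; subst hiz; tauto
        · have := hh v rfl hiz; tauto
      have hpref : pvChg (i + 1) v (rest.takeWhile (· == v) ++ rest.dropWhile (· == v))
          = pvChg (i + 1 + (rest.takeWhile (· == v)).length) v (rest.dropWhile (· == v)) :=
        pvChg_const_prefix _ v
          (fun y hy => by simpa using List.mem_takeWhile_imp hy) _ _
      have hrec : reduce_to_lines_per_burst_dict_py_alt_go
            (i + ((rest.takeWhile (· == v)).length + 1)) (rest.dropWhile (· == v))
          = pvChg (i + ((rest.takeWhile (· == v)).length + 1)) v (rest.dropWhile (· == v)) := by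
        apply ihn
        · have h1 := List.length_dropWhile_le (p := (· == v)) (l := rest)
          simp only [List.length_cons] at hl
          omega
        · omega
        · intro habs; omega
        · intro h hhd _
          have hnp := List.head?_dropWhile_not (p := (· == v)) (l := rest)
          rw [hhd] at hnp
          simpa using hnp
      have hidx : i + (((rest.takeWhile (· == v)).length : Int) + 1) =
          i + 1 + ((rest.takeWhile (· == v)).length : Int) := by ring
      by_cases hv : v ≠ last
      · rw [if_pos (hemit.2 hv)]
        rw [hrec, hidx]
        simp only [pvChg]
        rw [if_pos hv]
        conv_rhs => rw [← hsplit]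
        rw [hpref]
        simp
      · rw [if_neg (fun hc => hv (hemit.1 hc))]
        rw [hrec, hidx]
        have hvv : v = last := not_not.1 hv
        subst hvv
        simp only [pvChg, ne_eq, not_true_eq_false, if_neg, not_false_eq_true, List.nil_append]
        conv_rhs => rw [← hsplit]
        rw [hpref]

-- ===== VERDICT (by name: the statement is the Claim_ definition above) =====
theorem reduce_to_lines_per_burst_dict_py_spec : Claim_equal_reduce_to_lines_per_burst_dict_py := by
  intro l _
  unfold Spec_reduce_to_lines_per_burst_dict_py
  unfold reduce_to_lines_per_burst_dict_py reduce_to_lines_per_burst_dict_py_alt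
  rw [pvA_fold l 0 0 PySem.Dict.empty (by simp [PySem.Dict.keys_empty])]
  rw [pvB_go_aux l.length l le_rfl 0 0 le_rfl (fun _ => rfl) (fun _ _ h => absurd rfl h)]
  rfl
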